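-- pv_equiv track=rewrite | github.com/Michael16b/Novaville | backend/core/db/models/useful_info.py | sort_opening_hours
-- ===== SOURCE A (Python) =====
-- DAY_ORDER = [
--     'Lundi',
--     'Mardi',
--     'Mercredi',
--     'Jeudi',
--     'Vendredi',
--     'Samedi',
--     'Dimanche',
-- ]
--
-- def sort_opening_hours(opening_hours_dict):
--     """Sort opening_hours dict by day order for consistent persistence."""
--     if not opening_hours_dict:
--         return {}
--
--     # Create new dict with days in correct order
--     result = {}
--
--     # Add days in DAY_ORDER first
--     for day in DAY_ORDER:
--         if day in opening_hours_dict: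
--             result[day] = opening_hours_dict[day]
--
--     # Add any unknown days at the end
--     for day, hours in opening_hours_dict.items():
--         if day not in result:
--             result[day] = hours
--
--     return result
-- ===== SOURCE B (Python) =====
-- DAY_ORDER = [
--     'Lundi',
--     'Mardi',
--     'Mercredi',
--     'Jeudi',
--     'Vendredi',
--     'Samedi',
--     'Dimanche',
-- ]
--
-- def sort_opening_hours(opening_hours_dict):
--     """Sort opening_hours dict by day order for consistent persistence."""
--     if not opening_hours_dict:
--         return {}
--     return dict(sorted(
--         opening_hours_dict.items(),
--         key=lambda kv: DAY_ORDER.index(kv[0]) if kv[0] in DAY_ORDER else len(DAY_ORDER),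
--     ))
-- ===== Notes on version B (the rewrite author's own statement) =====
-- stated objective: idiomatic
-- what changed: Replaces A's two-pass dict rebuild (scan DAY_ORDER with membership tests, then re-scan the items for unknown days) by a single stable sort of the items keyed by weekday rank, with unknown days all ranked len(DAY_ORDER) so stability keeps their insertion order.
import Mathlib
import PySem

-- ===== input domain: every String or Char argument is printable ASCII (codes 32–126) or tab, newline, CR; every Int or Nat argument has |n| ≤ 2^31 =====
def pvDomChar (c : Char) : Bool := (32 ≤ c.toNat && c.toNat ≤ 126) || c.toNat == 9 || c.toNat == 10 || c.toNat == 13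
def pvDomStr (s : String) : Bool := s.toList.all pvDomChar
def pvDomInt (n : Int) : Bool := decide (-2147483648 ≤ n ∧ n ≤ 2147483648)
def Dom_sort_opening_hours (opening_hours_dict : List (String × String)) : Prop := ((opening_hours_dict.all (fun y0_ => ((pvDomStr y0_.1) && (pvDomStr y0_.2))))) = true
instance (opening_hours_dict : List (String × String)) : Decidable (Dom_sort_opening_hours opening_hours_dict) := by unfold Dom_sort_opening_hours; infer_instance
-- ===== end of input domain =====

-- B replaces A's two-pass dict rebuild by one stable sort of the items keyed by weekday
-- rank (unknown days all rank 7, so stability keeps their insertion order); equivalence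
-- of the RETURN value is proved on association lists with pairwise-distinct keys.

-- ===== PORT A =====
def DAY_ORDER : List String :=
  ["Lundi", "Mardi", "Mercredi", "Jeudi", "Vendredi", "Samedi", "Dimanche"]

def sort_opening_hours (opening_hours_dict : List (String × String)) : List (String × String) :=
  if opening_hours_dict = [] then []
  else
    -- the incoming dict
    let d : PySem.Dict String String := PySem.Dict.mk opening_hours_dict
    -- for day in DAY_ORDER: if day in d: result[day] = d[day]
    -- (d[day] is read under the 'day in d' guard, so getD with a dummy default is exact)
    let result1 : PySem.Dict String String :=
      DAY_ORDER.foldl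
        (fun r day => if d.contains day then r.insert day (d.getD day "") else r)
        PySem.Dict.empty
    -- for day, hours in d.items(): if day not in result: result[day] = hours
    let result2 : PySem.Dict String String :=
      d.items.foldl
        (fun r p => if r.contains p.1 then r else r.insert p.1 p.2)
        result1
    result2.items

-- ===== PORT B =====
-- DAY_ORDER.index(kv[0]) if kv[0] in DAY_ORDER else len(DAY_ORDER)
def pyRank (day : String) : Nat :=
  match PySem.List.index? DAY_ORDER day with
  | some i => i
  | none => DAY_ORDER.length

def sort_opening_hours_alt (opening_hours_dict : List (String × String)) : List (String × String) :=
  if opening_hours_dict = [] then []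
  else
    (PySem.Dict.ofList
      (PySem.List.sorted opening_hours_dict (fun kv => pyRank kv.1))).items

-- ===== PRECONDITION & SPEC =====
-- Pre_ excludes association lists with duplicate keys, which do not represent any
-- Python dict (A's argument is a dict, whose keys are necessarily distinct).
def Pre_sort_opening_hours (opening_hours_dict : List (String × String)) : Prop :=
  (opening_hours_dict.map Prod.fst).Nodup
instance (opening_hours_dict : List (String × String)) : Decidable (Pre_sort_opening_hours opening_hours_dict) := by unfold Pre_sort_opening_hours; infer_instance

def pvWitness_sort_opening_hours : (List (String × String)) :=
  [("Mardi", "9-17"), ("Zeta", "closed"), ("Lundi", "8-12")]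

def Spec_sort_opening_hours (opening_hours_dict : List (String × String)) (out : List (String × String)) : Prop := out = sort_opening_hours_alt opening_hours_dict
instance (opening_hours_dict : List (String × String)) (out : List (String × String)) : Decidable (Spec_sort_opening_hours opening_hours_dict out) := by unfold Spec_sort_opening_hours; infer_instance

-- ===== CLAIM (what is proved, stated in full; the proofs are below) =====
def Claim_equal_sort_opening_hours : Prop := ∀ (opening_hours_dict : List (String × String)), Dom_sort_opening_hours opening_hours_dict → Pre_sort_opening_hours opening_hours_dict → Spec_sort_opening_hours opening_hours_dict (sort_opening_hours opening_hours_dict)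

-- ===== LEMMAS AND PROOFS =====

-- insertBy passes over every element it does not go before
theorem insertBy_append_left {α : Type} (before : α → α → Bool) (x : α) (as bs : List α)
    (h : ∀ a ∈ as, before x a = false) :
    PySem.List.insertBy before x (as ++ bs) = as ++ PySem.List.insertBy before x bs := by
  induction as with
  | nil => rfl
  | cons a t ih =>
    have ha : before x a = false := h a (by simp)
    show (if before x a then _ else _) = _
    rw [ha]
    simp only [Bool.false_eq_true, if_false, List.cons_append]
    exact congrArg (a :: ·) (ih (fun a ha => h a (by simp [ha])))

theorem insertBy_all_before {α : Type} (before : α → α → Bool) (x : α) (ys : List α)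
    (h : ∀ y ∈ ys, before x y = true) :
    PySem.List.insertBy before x ys = x :: ys := by
  cases ys with
  | nil => rfl
  | cons y t =>
    have := h y (by simp)
    show (if before x y then _ else _) = _
    rw [this]
    simp

theorem flatMap_congr_mem {α β : Type} (l : List α) (f g : α → List β)
    (h : ∀ a ∈ l, f a = g a) : l.flatMap f = l.flatMap g := by
  induction l with
  | nil => rfl
  | cons a t ih =>
    simp only [List.flatMap_cons, h a (by simp), ih (fun a ha => h a (by simp [ha]))]

-- stability of PySem's sort for a Nat key: the result is the buckets in increasing
-- key order, each bucket in input order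
theorem sorted_nat_buckets {α : Type} (key : α → Nat) (N : Nat) (xs : List α)
    (h : ∀ x ∈ xs, key x ≤ N) :
    PySem.List.sorted xs key =
      (List.range (N + 1)).flatMap (fun i => xs.filter (fun x => key x == i)) := by
  induction xs using List.reverseRecOn with
  | nil => simp [PySem.List.sorted_eq_foldl_insertBy]
  | append_singleton xs x ih =>
    have hx : key x ≤ N := h x (by simp)
    have hxs : ∀ y ∈ xs, key y ≤ N := fun y hy => h y (by simp [hy])
    have hstep : PySem.List.sorted (xs ++ [x]) key =
        PySem.List.insertBy (fun a b => decide (key a < key b)) x (PySem.List.sorted xs key) := by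
      rw [PySem.List.sorted_eq_foldl_insertBy, PySem.List.sorted_eq_foldl_insertBy,
        List.foldl_append]
      rfl
    rw [hstep, ih hxs]
    have hranges : List.range (N + 1) =
        List.range (key x + 1) ++ (List.range (N - key x)).map (fun j => (key x + 1) + j) := by
      rw [← List.range_add]
      congr 1
      omega
    rw [hranges, List.flatMap_append, List.flatMap_append]
    rw [insertBy_append_left _ _ _ _ (by
      intro a ha
      rw [List.mem_flatMap] at ha
      obtain ⟨i, hi, hai⟩ := ha
      rw [List.mem_range] at hi
      rw [List.mem_filter] at hai
      have : key a = i := by simpa using hai.2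
      simp only [decide_eq_false_iff_not, not_lt]
      omega)]
    rw [insertBy_all_before _ _ _ (by
      intro y hy
      rw [List.mem_flatMap] at hy
      obtain ⟨i, hi, hyi⟩ := hy
      rw [List.mem_map] at hi
      obtain ⟨j, _, hj⟩ := hi
      rw [List.mem_filter] at hyi
      have : key y = i := by simpa using hyi.2
      simp only [decide_eq_true_eq]
      omega)]
    have hQ : ((List.range (N - key x)).map (fun j => (key x + 1) + j)).flatMap
          (fun i => (xs ++ [x]).filter (fun y => key y == i)) =
        ((List.range (N - key x)).map (fun j => (key x + 1) + j)).flatMap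
          (fun i => xs.filter (fun y => key y == i)) := by
      apply flatMap_congr_mem
      intro i hi
      rw [List.mem_map] at hi
      obtain ⟨j, _, hj⟩ := hi
      rw [List.filter_append]
      have : (key x == i) = false := by
        simp only [beq_eq_false_iff_ne, ne_eq]
        omega
      simp [this]
    have hPsmall : ∀ (m : Nat), m ≤ key x → (List.range m).flatMap
          (fun i => (xs ++ [x]).filter (fun y => key y == i)) =
        (List.range m).flatMap (fun i => xs.filter (fun y => key y == i)) := by
      intro m hm
      apply flatMap_congr_mem
      intro i hi
      rw [List.mem_range] at hi
      rw [List.filter_append]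
      have : (key x == i) = false := by
        simp only [beq_eq_false_iff_ne, ne_eq]
        omega
      simp [this]
    have hP : (List.range (key x + 1)).flatMap
          (fun i => (xs ++ [x]).filter (fun y => key y == i)) =
        (List.range (key x + 1)).flatMap (fun i => xs.filter (fun y => key y == i)) ++ [x] := by
      rw [List.range_succ, List.flatMap_append, List.flatMap_append,
        hPsmall (key x) (le_refl _)]
      simp [List.filter_append, List.append_assoc]
    rw [hQ, hP]
    simp [List.append_assoc]

-- a dict built from an assoc list with distinct keys has exactly those items
theorem ofList_items_of_nodup (ys : List (String × String))
    (h : (ys.map Prod.fst).Nodup) : (PySem.Dict.ofList ys).items = ys := by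
  have := PySem.Dict.items_foldl_insert_fresh ys Prod.fst Prod.snd PySem.Dict.empty
    (fun a _ => PySem.Dict.contains_empty _) h
  simpa using this

-- with distinct keys, filtering by a key yields the looked-up pair (or nothing)
theorem filter_key (xs : List (String × String)) (h : (xs.map Prod.fst).Nodup)
    (day : String) :
    xs.filter (fun p => p.1 == day) =
      match (PySem.Dict.mk xs).get? day with
      | some v => [(day, v)]
      | none => [] := by
  induction xs with
  | nil => rfl
  | cons p t ih =>
    obtain ⟨k, w⟩ := p
    simp only [List.map_cons, List.nodup_cons] at h
    rw [PySem.Dict.get?_mk_cons, List.filter_cons]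
    by_cases hk : k = day
    · subst hk
      have hnil : t.filter (fun p => p.1 == k) = [] := by
        rw [List.filter_eq_nil_iff]
        intro p hp
        simp only [beq_iff_eq]
        intro hpk
        exact h.1 (hpk ▸ List.mem_map_of_mem hp)
      simp [hnil]
    · have hbk : (k == day) = false := by simp [hk]
      simp only [hbk, Bool.false_eq_true, if_false]
      exact ih h.2

-- A's first loop, re-expressed: one looked-up pair per present day, in DAY_ORDER order
theorem flatMap_days (xs : List (String × String)) (h : (xs.map Prod.fst).Nodup)
    (days : List String) :
    days.flatMap (fun day => xs.filter (fun p => p.1 == day)) =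
      (days.filter (fun day => (PySem.Dict.mk xs).contains day)).map
        (fun day => (day, (PySem.Dict.mk xs).getD day "")) := by
  induction days with
  | nil => rfl
  | cons day rest ih =>
    rw [List.flatMap_cons, ih, List.filter_cons, filter_key xs h day]
    cases hget : (PySem.Dict.mk xs).get? day with
    | some v =>
      have hc : (PySem.Dict.mk xs).contains day = true := by
        rw [PySem.Dict.contains_eq_isSome_get?, hget]; rfl
      have hgd : (PySem.Dict.mk xs).getD day "" = v :=
        PySem.Dict.getD_of_get?_eq_some _ "" hget
      simp [hc, hgd]
    | none =>
      have hc : (PySem.Dict.mk xs).contains day = false := by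
        rw [PySem.Dict.contains_eq_isSome_get?, hget]; rfl
      simp [hc]

theorem pyRank_le (s : String) : pyRank s ≤ 7 := by
  unfold pyRank
  cases hidx : PySem.List.index? DAY_ORDER s with
  | none => exact le_refl _
  | some i =>
    obtain ⟨hk, _, _⟩ := PySem.List.getElem_of_index?_eq_some hidx
    simpa [DAY_ORDER] using Nat.le_of_lt hk

theorem pyRank_eq_iff (s : String) (i : Nat) (hi : i < 7) :
    pyRank s = i ↔ s = DAY_ORDER[i]'(by simpa [DAY_ORDER] using hi) := by
  unfold pyRank
  cases hidx : PySem.List.index? DAY_ORDER s with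
  | none =>
    rw [PySem.List.index?_eq_none_iff] at hidx
    constructor
    · intro h7
      exfalso
      have h7' : DAY_ORDER.length = i := h7
      have hlen : DAY_ORDER.length = 7 := rfl
      omega
    · intro hmem
      exfalso
      apply hidx
      rw [hmem]
      exact List.getElem_mem _
  | some j =>
    obtain ⟨hj, hgj, _⟩ := PySem.List.getElem_of_index?_eq_some hidx
    have hnd : DAY_ORDER.Nodup := by decide
    constructor
    · intro hji; subst hji; exact hgj.symm
    · intro hsi
      have : DAY_ORDER[j]'hj = DAY_ORDER[i]'(by simpa [DAY_ORDER] using hi) := by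
        rw [hgj, hsi]
      exact (hnd.getElem_inj_iff.mp this)

theorem pyRank_eq_seven_iff (s : String) : pyRank s = 7 ↔ s ∉ DAY_ORDER := by
  unfold pyRank
  cases hidx : PySem.List.index? DAY_ORDER s with
  | none =>
    rw [PySem.List.index?_eq_none_iff] at hidx
    simpa [DAY_ORDER] using hidx
  | some j =>
    obtain ⟨hj, hgj, _⟩ := PySem.List.getElem_of_index?_eq_some hidx
    constructor
    · intro h7
      exfalso
      have h7' : j = 7 := h7
      have hlen : DAY_ORDER.length = 7 := rfl
      omega
    · intro hmem
      exact absurd (hgj ▸ List.getElem_mem hj) hmem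

-- A's second loop: items already present are skipped, fresh ones are appended
theorem loop2_items (l : List (String × String)) (P : String → Bool) :
    ∀ (r : PySem.Dict String String),
      (∀ p ∈ l, r.contains p.1 = P p.1) → (l.map Prod.fst).Nodup →
      (l.foldl (fun r p => if r.contains p.1 then r else r.insert p.1 p.2) r).items =
        r.items ++ l.filter (fun p => !P p.1) := by
  induction l with
  | nil => intro r _ _; simp
  | cons p t ih =>
    intro r hc hnd
    simp only [List.map_cons, List.nodup_cons] at hnd
    have hcp : r.contains p.1 = P p.1 := hc p (by simp)
    rw [List.foldl_cons, List.filter_cons]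
    cases hP : P p.1 with
    | true =>
      have := ih r (fun q hq => hc q (by simp [hq])) hnd.2
      simpa [hcp, hP] using this
    | false =>
      rw [hcp, hP]
      rw [if_neg (by simp)]
      rw [ih (r.insert p.1 p.2) (fun q hq => by
        rw [PySem.Dict.contains_insert]
        have hne : q.1 ≠ p.1 := by
          intro hqp
          exact hnd.1 (hqp ▸ List.mem_map_of_mem hq)
        rw [show (q.1 == p.1) = false by simpa using hne]
        simpa using hc q (by simp [hq])) hnd.2]
      rw [PySem.Dict.items_insert_of_not_contains _ _ (by rw [hcp, hP])]
      simp [List.append_assoc]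

theorem bucket_day (xs : List (String × String)) (i : Nat) (hi : i < 7) :
    xs.filter (fun p : String × String => pyRank p.1 == i) =
      xs.filter (fun p => p.1 == DAY_ORDER[i]'(by simpa [DAY_ORDER] using hi)) := by
  apply List.filter_congr
  intro p _
  rw [Bool.eq_iff_iff]
  simp only [beq_iff_eq]
  exact pyRank_eq_iff p.1 i hi

-- ===== VERDICT (by name: the statement is the Claim_ definition above) =====
theorem sort_opening_hours_spec : Claim_equal_sort_opening_hours := by
  intro xs _ hpre
  unfold Spec_sort_opening_hours
  by_cases hnil : xs = []
  · subst hnil; rfl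
  · have hpre' : (xs.map Prod.fst).Nodup := hpre
    have hA : sort_opening_hours xs =
        ((PySem.Dict.mk xs).items.foldl
          (fun r p => if r.contains p.1 then r else r.insert p.1 p.2)
          (DAY_ORDER.foldl
            (fun r day => if (PySem.Dict.mk xs).contains day then
              r.insert day ((PySem.Dict.mk xs).getD day "") else r)
            PySem.Dict.empty)).items := by
      unfold sort_opening_hours
      rw [if_neg hnil]
    have hB : sort_opening_hours_alt xs =
        (PySem.Dict.ofList (PySem.List.sorted xs (fun kv => pyRank kv.1))).items := by
      unfold sort_opening_hours_alt
      rw [if_neg hnil]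
    rw [hA, hB]
    -- B side: drop the dict round-trip, then name the stable-sort result
    have hsortnodup : ((PySem.List.sorted xs (fun kv : String × String => pyRank kv.1)).map
        Prod.fst).Nodup := by
      have hperm : (PySem.List.sorted xs (fun kv : String × String => pyRank kv.1)).Perm xs :=
        PySem.List.sorted_perm xs _ false
      exact ((hperm.map Prod.fst).nodup_iff).mpr hpre'
    rw [ofList_items_of_nodup _ hsortnodup]
    rw [sorted_nat_buckets (fun kv : String × String => pyRank kv.1) 7 xs
      (fun p _ => pyRank_le p.1)]
    rw [show (7 : Nat) + 1 = 8 from rfl, show (8 : Nat) = Nat.succ 7 from rfl,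
      List.range_succ, List.flatMap_append]
    simp only [List.flatMap_cons, List.flatMap_nil, List.append_nil]
    -- the seven ranked buckets are the per-day filters, in DAY_ORDER order
    have hfront : (List.range 7).flatMap
          (fun i => xs.filter (fun p : String × String => pyRank p.1 == i)) =
        DAY_ORDER.flatMap (fun day => xs.filter (fun p => p.1 == day)) := by
      rw [show List.range 7 = [0, 1, 2, 3, 4, 5, 6] by rfl]
      simp only [List.flatMap_cons, List.flatMap_nil, List.append_nil]
      rw [bucket_day xs 0 (by omega), bucket_day xs 1 (by omega), bucket_day xs 2 (by omega),
        bucket_day xs 3 (by omega), bucket_day xs 4 (by omega), bucket_day xs 5 (by omega),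
        bucket_day xs 6 (by omega)]
      simp only [DAY_ORDER, List.flatMap_cons, List.flatMap_nil, List.append_nil]
      rfl
    -- the last bucket is exactly the unknown days, in input order
    have hb7 : xs.filter (fun p : String × String => pyRank p.1 == 7) =
        xs.filter (fun p => !decide (p.1 ∈ DAY_ORDER)) := by
      apply List.filter_congr
      intro p _
      rw [Bool.eq_iff_iff]
      simp only [beq_iff_eq, Bool.not_eq_eq_eq_not, Bool.not_true, decide_eq_false_iff_not]
      exact pyRank_eq_seven_iff p.1
    rw [hfront, hb7]
    -- A side: first loop
    have h1 : (DAY_ORDER.foldl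
          (fun r day => if (PySem.Dict.mk xs).contains day then
            r.insert day ((PySem.Dict.mk xs).getD day "") else r)
          PySem.Dict.empty).items =
        (DAY_ORDER.filter (fun day => (PySem.Dict.mk xs).contains day)).map
          (fun day => (day, (PySem.Dict.mk xs).getD day "")) := by
      rw [PySem.List.foldl_if_eq_foldl_filter (fun day => (PySem.Dict.mk xs).contains day)
        (fun (r : PySem.Dict String String) day => r.insert day ((PySem.Dict.mk xs).getD day ""))]
      have := PySem.Dict.items_foldl_insert_fresh
        (DAY_ORDER.filter (fun day => (PySem.Dict.mk xs).contains day))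
        (fun day => day) (fun day => (PySem.Dict.mk xs).getD day "") PySem.Dict.empty
        (fun a _ => PySem.Dict.contains_empty _)
        (by simpa using List.Nodup.filter _ (by decide : DAY_ORDER.Nodup))
      simpa using this
    -- A side: second loop, over the items of the input dict
    have hcontains_r1 : ∀ p ∈ (PySem.Dict.mk xs).items,
        (DAY_ORDER.foldl
          (fun r day => if (PySem.Dict.mk xs).contains day then
            r.insert day ((PySem.Dict.mk xs).getD day "") else r)
          PySem.Dict.empty).contains p.1 = decide (p.1 ∈ DAY_ORDER) := by
      intro p hp
      rw [PySem.Dict.contains_eq_decide_mem_keys]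
      have hdc : (PySem.Dict.mk xs).contains p.1 = true :=
        (PySem.Dict.contains_iff_mem_keys _ _).mpr (List.mem_map_of_mem hp)
      have hkeys : (DAY_ORDER.foldl
          (fun r day => if (PySem.Dict.mk xs).contains day then
            r.insert day ((PySem.Dict.mk xs).getD day "") else r)
          PySem.Dict.empty).keys =
          DAY_ORDER.filter (fun day => (PySem.Dict.mk xs).contains day) := by
        show (DAY_ORDER.foldl _ PySem.Dict.empty).items.map Prod.fst = _
        rw [h1, List.map_map]
        rw [show (Prod.fst ∘ fun day => (day, (PySem.Dict.mk xs).getD day "")) = id from rfl,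
          List.map_id]
      rw [hkeys]
      apply decide_eq_decide.mpr
      simp only [List.mem_filter]
      constructor
      · intro hm; exact hm.1
      · intro hm; exact ⟨hm, hdc⟩
    rw [loop2_items (PySem.Dict.mk xs).items (fun day => decide (day ∈ DAY_ORDER)) _
      hcontains_r1 hpre', h1]
    rw [flatMap_days xs hpre' DAY_ORDER]
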